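-- pv_equiv track=rewrite | github.com/ljcleo/hardcore-logic | prepare/src/kakurasu/gen_uns.py | validate_solution
-- ===== SOURCE A (Python) =====
-- def validate_solution(clue_rows, clue_cols, black_cells):
--     """验证解是否满足线索要求"""
--     if not black_cells:
--         return False
--     num_rows = len(clue_rows)
--     num_cols = len(clue_cols)
--     row_sums = [0] * num_rows
--     col_sums = [0] * num_cols
--
--     for r, c in black_cells:
--         if r < 1 or r > num_rows or c < 1 or c > num_cols:
--             return False
--         row_sums[r - 1] += c
--         col_sums[c - 1] += r
--
--     return row_sums == list(clue_rows) and col_sums == list(clue_cols)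
-- ===== SOURCE B (Python) =====
-- def validate_solution(clue_rows, clue_cols, black_cells):
--     """验证解是否满足线索要求"""
--     if not black_cells:
--         return False
--     num_rows = len(clue_rows)
--     num_cols = len(clue_cols)
--     if any(not (1 <= r <= num_rows and 1 <= c <= num_cols) for r, c in black_cells):
--         return False
--     row_sums = [sum(c for r, c in black_cells if r == i + 1) for i in range(num_rows)]
--     col_sums = [sum(r for r, c in black_cells if c == j + 1) for j in range(num_cols)]
--     return row_sums == list(clue_rows) and col_sums == list(clue_cols)
-- ===== Notes on version B (the rewrite author's own statement) =====
-- stated objective: alternative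
-- what changed: Replaces A's single accumulating pass with mutable row/col sum arrays and early return by a separate bounds check followed by per-index group-by comprehensions that recompute each row/column sum from the cell list.
import Mathlib
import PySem

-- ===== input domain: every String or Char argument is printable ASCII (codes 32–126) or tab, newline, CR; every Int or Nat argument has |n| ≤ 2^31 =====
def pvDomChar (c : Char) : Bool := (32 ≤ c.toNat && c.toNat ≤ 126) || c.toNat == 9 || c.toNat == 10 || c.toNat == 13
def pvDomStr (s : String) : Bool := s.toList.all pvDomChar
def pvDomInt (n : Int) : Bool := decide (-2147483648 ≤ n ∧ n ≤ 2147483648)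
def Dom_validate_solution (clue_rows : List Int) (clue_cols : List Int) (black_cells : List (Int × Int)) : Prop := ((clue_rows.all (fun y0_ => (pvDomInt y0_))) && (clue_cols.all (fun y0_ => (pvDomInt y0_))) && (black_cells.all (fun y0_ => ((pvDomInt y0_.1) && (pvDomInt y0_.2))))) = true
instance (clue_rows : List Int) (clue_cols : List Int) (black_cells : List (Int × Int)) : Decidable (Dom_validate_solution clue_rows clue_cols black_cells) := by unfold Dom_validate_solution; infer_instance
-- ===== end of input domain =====

-- B replaces A's single accumulating pass (mutable sum arrays, early return) by a
-- bounds check and per-index group-by recomputation: an alternative decomposition,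
-- not a speedup.

-- ===== PORT A =====
-- the loop `for r, c in black_cells: …` with its early `return False` and the
-- in-place `row_sums[r-1] += c; col_sums[c-1] += r` updates
def validateLoopA (clue_rows clue_cols : List Int) (num_rows num_cols : Int) :
    List (Int × Int) → List Int → List Int → Bool
  | [], row_sums, col_sums =>
      decide (row_sums = clue_rows) && decide (col_sums = clue_cols)
  | (r, c) :: rest, row_sums, col_sums =>
      if r < 1 || r > num_rows || c < 1 || c > num_cols then false
      else validateLoopA clue_rows clue_cols num_rows num_cols rest
        (row_sums.modify (r - 1).toNat (· + c))
        (col_sums.modify (c - 1).toNat (· + r))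

def validate_solution (clue_rows : List Int) (clue_cols : List Int) (black_cells : List (Int × Int)) : Bool :=
  if black_cells = [] then false
  else
    let num_rows : Int := clue_rows.length
    let num_cols : Int := clue_cols.length
    validateLoopA clue_rows clue_cols num_rows num_cols black_cells
      (List.replicate clue_rows.length 0) (List.replicate clue_cols.length 0)

-- ===== PORT B =====
def validate_solution_alt (clue_rows : List Int) (clue_cols : List Int) (black_cells : List (Int × Int)) : Bool :=
  if black_cells = [] then false
  else
    let num_rows : Int := clue_rows.length
    let num_cols : Int := clue_cols.length
    if black_cells.any (fun p =>
        !(1 ≤ p.1 && p.1 ≤ num_rows && 1 ≤ p.2 && p.2 ≤ num_cols)) then false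
    else
      let row_sums := (List.range clue_rows.length).map (fun (i : Nat) =>
        ((black_cells.filter (fun p => p.1 == (i : Int) + 1)).map Prod.snd).sum)
      let col_sums := (List.range clue_cols.length).map (fun (j : Nat) =>
        ((black_cells.filter (fun p => p.2 == (j : Int) + 1)).map Prod.fst).sum)
      decide (row_sums = clue_rows) && decide (col_sums = clue_cols)

-- ===== PRECONDITION & SPEC =====
def Spec_validate_solution (clue_rows : List Int) (clue_cols : List Int) (black_cells : List (Int × Int)) (out : Bool) : Prop := out = validate_solution_alt clue_rows clue_cols black_cells
instance (clue_rows : List Int) (clue_cols : List Int) (black_cells : List (Int × Int)) (out : Bool) : Decidable (Spec_validate_solution clue_rows clue_cols black_cells out) := by unfold Spec_validate_solution; infer_instance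

-- ===== CLAIM (what is proved, stated in full; the proofs are below) =====
def Claim_equal_validate_solution : Prop := ∀ (clue_rows : List Int) (clue_cols : List Int) (black_cells : List (Int × Int)), Dom_validate_solution clue_rows clue_cols black_cells → Spec_validate_solution clue_rows clue_cols black_cells (validate_solution clue_rows clue_cols black_cells)

-- ===== LEMMAS AND PROOFS =====

-- the foldl A's loop performs on one of its accumulators (selector sel picks the
-- coordinate indexed by, oth the coordinate added; rows: sel = fst, oth = snd)
def accFold (sel oth : Int × Int → Int) (cells : List (Int × Int)) (s : List Int) : List Int :=
  cells.foldl (fun s p => s.modify (sel p - 1).toNat (· + oth p)) s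

-- the group sum B computes for index i on the same selector pair
def selGroup (sel oth : Int × Int → Int) (cells : List (Int × Int)) (i : Nat) : Int :=
  ((cells.filter (fun p => sel p == (i : Int) + 1)).map oth).sum

lemma accFold_getElem? (sel oth : Int × Int → Int) (cells : List (Int × Int))
    (s : List Int) (hin : ∀ p ∈ cells, 1 ≤ sel p ∧ sel p ≤ (s.length : Int)) (i : Nat) :
    (accFold sel oth cells s)[i]? = (s[i]?).map (· + selGroup sel oth cells i) := by
  induction cells generalizing s with
  | nil =>
    simp only [accFold, List.foldl_nil, selGroup, List.filter_nil, List.map_nil,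
      List.sum_nil]
    cases s[i]? <;> simp
  | cons p rest ih =>
    have hp := hin p (by simp)
    have hlen : (s.modify (sel p - 1).toNat (· + oth p)).length = s.length :=
      List.length_modify ..
    have hrest : ∀ q ∈ rest, 1 ≤ sel q ∧ sel q ≤ ((s.modify (sel p - 1).toNat (· + oth p)).length : Int) := by
      intro q hq; rw [hlen]; exact hin q (by simp [hq])
    rw [accFold, List.foldl_cons, ← accFold, ih _ hrest, List.getElem?_modify]
    cases s[i]? with
    | none => rfl
    | some v =>
      by_cases hip : (sel p - 1).toNat = i
      · have hsel : (sel p == (i : Int) + 1) = true := by simp; omega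
        simp only [Option.map_some, Option.map_eq_map, selGroup, List.filter_cons,
          hsel, if_pos hip, if_pos, List.map_cons, List.sum_cons]
        congr 1; ring
      · have hsel : (sel p == (i : Int) + 1) = false := by simp; omega
        simp only [Option.map_some, Option.map_eq_map, selGroup, List.filter_cons,
          hsel, if_neg hip, Bool.false_eq_true, if_false]

lemma accFold_replicate (sel oth : Int × Int → Int) (cells : List (Int × Int)) (n : Nat)
    (hin : ∀ p ∈ cells, 1 ≤ sel p ∧ sel p ≤ (n : Int)) :
    accFold sel oth cells (List.replicate n 0) =
      (List.range n).map (selGroup sel oth cells) := by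
  apply List.ext_getElem?
  intro i
  rw [accFold_getElem? sel oth cells _ (by simpa using hin) i]
  by_cases hi : i < n
  · simp [hi]
  · simp [hi]

-- A's loop, when no cell is out of bounds, is the fold on both accumulators
lemma validateLoopA_all_in (clue_rows clue_cols : List Int) (num_rows num_cols : Int)
    (cells : List (Int × Int)) (rs cs : List Int)
    (hin : ∀ p ∈ cells, 1 ≤ p.1 ∧ p.1 ≤ num_rows ∧ 1 ≤ p.2 ∧ p.2 ≤ num_cols) :
    validateLoopA clue_rows clue_cols num_rows num_cols cells rs cs =
      (decide (accFold Prod.fst Prod.snd cells rs = clue_rows) &&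
       decide (accFold Prod.snd Prod.fst cells cs = clue_cols)) := by
  induction cells generalizing rs cs with
  | nil => simp [validateLoopA, accFold]
  | cons p rest ih =>
    obtain ⟨h1, h2, h3, h4⟩ := hin p (by simp)
    obtain ⟨r, c⟩ := p
    rw [validateLoopA]
    have hg : ¬(r < 1 || r > num_rows || c < 1 || c > num_cols) = true := by
      simp at h1 h2 h3 h4 ⊢; omega
    rw [if_neg hg, ih _ _ (fun q hq => hin q (by simp [hq]))]
    simp [accFold]

-- A's loop returns false as soon as some cell is out of bounds
lemma validateLoopA_bad (clue_rows clue_cols : List Int) (num_rows num_cols : Int)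
    (cells : List (Int × Int)) (rs cs : List Int)
    (hbad : ∃ p ∈ cells, ¬(1 ≤ p.1 ∧ p.1 ≤ num_rows ∧ 1 ≤ p.2 ∧ p.2 ≤ num_cols)) :
    validateLoopA clue_rows clue_cols num_rows num_cols cells rs cs = false := by
  induction cells generalizing rs cs with
  | nil => simp at hbad
  | cons p rest ih =>
    obtain ⟨r, c⟩ := p
    rw [validateLoopA]
    by_cases hg : (r < 1 || r > num_rows || c < 1 || c > num_cols) = true
    · simp [hg]
    · rw [if_neg hg]
      apply ih
      rcases hbad with ⟨q, hq, hqb⟩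
      rcases List.mem_cons.1 hq with hq' | hq'
      · exfalso; apply hqb; subst hq'; simp at hg; simp; omega
      · exact ⟨q, hq', hqb⟩

-- ===== VERDICT (by name: the statement is the Claim_ definition above) =====
theorem validate_solution_spec : Claim_equal_validate_solution := by
  intro clue_rows clue_cols black_cells _
  unfold Spec_validate_solution validate_solution validate_solution_alt
  by_cases hemp : black_cells = []
  · rw [if_pos hemp, if_pos hemp]
  · rw [if_neg hemp, if_neg hemp]
    by_cases hany : (black_cells.any (fun p =>
        !(1 ≤ p.1 && p.1 ≤ (clue_rows.length : Int) && 1 ≤ p.2 && p.2 ≤ (clue_cols.length : Int)))) = true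
    · have hbad : ∃ p ∈ black_cells, ¬(1 ≤ p.1 ∧ p.1 ≤ ((clue_rows.length : Nat) : Int) ∧
          1 ≤ p.2 ∧ p.2 ≤ ((clue_cols.length : Nat) : Int)) := by
        rcases List.any_eq_true.1 hany with ⟨p, hp, hpb⟩
        refine ⟨p, hp, ?_⟩
        simp at hpb; omega
      rw [if_pos hany]
      exact validateLoopA_bad _ _ _ _ _ _ _ hbad
    · have hok : ∀ p ∈ black_cells, 1 ≤ p.1 ∧ p.1 ≤ ((clue_rows.length : Nat) : Int) ∧
          1 ≤ p.2 ∧ p.2 ≤ ((clue_cols.length : Nat) : Int) := by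
        intro p hp
        have := List.any_eq_false.1 (Bool.of_not_eq_true hany) p hp
        simp at this; omega
      rw [if_neg hany]
      rw [validateLoopA_all_in _ _ _ _ _ _ _ hok]
      rw [accFold_replicate _ _ _ _ (fun p hp => ⟨(hok p hp).1, (hok p hp).2.1⟩)]
      rw [accFold_replicate _ _ _ _ (fun p hp => ⟨(hok p hp).2.2.1, (hok p hp).2.2.2⟩)]
      rfl
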